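-- pv_equiv track=rewrite | github.com/chenghuige/transwarp-nlp | transwarpnlp/dataprocess/pos_data_transform.py | handle_content
-- ===== SOURCE A (Python) =====
-- def handle_content(line):
--     if line == "\n":
--         return ""
--     else:
--         words = line.split(" ")
--         results = []
--         for word in words:
--             if word.startswith('['):
--                 word = word[1:]
--             if word.find(']') != -1:
--                 word = word.split("]")[0]
--
--             results.append(word)
--         return " ".join(results)
-- ===== SOURCE B (Python) =====
-- def handle_content(line):
--     if line == "\n":
--         return ""
--     out = []
--     at_start = True
--     dropping = False
--     for c in line:
--         if c == " ":
--             out.append(c)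
--             at_start = True
--             dropping = False
--         elif dropping:
--             pass
--         elif at_start and c == "[":
--             at_start = False
--         elif c == "]":
--             at_start = False
--             dropping = True
--         else:
--             out.append(c)
--             at_start = False
--     return "".join(out)
-- ===== Notes on version B (the rewrite author's own statement) =====
-- stated objective: alternative
-- what changed: Replaces the split-into-words / per-word strip-and-truncate / rejoin pipeline with a single left-to-right character scan carrying two flags (token-start, dropping-after-']'), emitting the output in one pass with no intermediate word lists.
import Mathlib
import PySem

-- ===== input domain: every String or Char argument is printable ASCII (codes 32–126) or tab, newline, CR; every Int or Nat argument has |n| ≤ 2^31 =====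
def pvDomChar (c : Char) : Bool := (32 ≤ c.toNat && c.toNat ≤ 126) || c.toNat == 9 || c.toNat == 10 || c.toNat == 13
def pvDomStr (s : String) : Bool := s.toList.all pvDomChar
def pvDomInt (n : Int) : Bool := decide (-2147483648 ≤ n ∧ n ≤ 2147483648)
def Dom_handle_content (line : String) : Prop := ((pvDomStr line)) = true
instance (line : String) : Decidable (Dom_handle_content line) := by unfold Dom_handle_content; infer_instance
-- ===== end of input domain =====

-- B replaces A's split/per-word/rejoin pipeline by a single character scan with two flags; same return value, no speed claim.

-- ===== PORT A =====
-- per-word body of A's loop: strip one leading '[', then truncate at the first ']'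
def pvProcA (w : List Char) : List Char :=
  let w1 := if PySem.Chars.startswith w ['['] then PySem.Chars.slice w (some 1) none else w
  -- word.split("]")[0]: the [0] index always exists (split returns a nonempty list), so .getD [] is never used
  if PySem.Chars.find w1 [']'] ≠ -1 then (PySem.List.pyGet? (PySem.Chars.splitOn w1 [']']) 0).getD [] else w1

def handle_content (line : String) : String :=
  if line = "\n" then "" else
    let words := PySem.Chars.splitOn line.toList [' ']
    let results := words.foldl (fun acc w => acc ++ [pvProcA w]) []
    String.ofList (PySem.Chars.join [' '] results)

-- ===== PORT B =====
-- one step of B's loop: state = (emitted chars, at_start, dropping)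
def pvStepB (st : List Char × Bool × Bool) (c : Char) : List Char × Bool × Bool :=
  if c = ' ' then (st.1 ++ [c], true, false)
  else if st.2.2 then st
  else if st.2.1 && c = '[' then (st.1, false, st.2.2)
  else if c = ']' then (st.1, false, true)
  else (st.1 ++ [c], false, st.2.2)

def handle_content_alt (line : String) : String :=
  if line = "\n" then "" else
    String.ofList (line.toList.foldl pvStepB ([], true, false)).1

-- ===== PRECONDITION & SPEC =====
def Spec_handle_content (line : String) (out : String) : Prop := out = handle_content_alt line
instance (line : String) (out : String) : Decidable (Spec_handle_content line out) := by unfold Spec_handle_content; infer_instance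

-- ===== CLAIM (what is proved, stated in full; the proofs are below) =====
def Claim_equal_handle_content : Prop := ∀ (line : String), Dom_handle_content line → Spec_handle_content line (handle_content line)

-- ===== LEMMAS AND PROOFS =====

-- clean single-char split (proof-side reference for PySem.Chars.splitOn with a one-char separator)
def pvSplit1 (sep : Char) : List Char → List (List Char)
  | [] => [[]]
  | c :: r =>
      if c = sep then [] :: pvSplit1 sep r
      else match pvSplit1 sep r with
        | [] => [[c]]
        | w :: ws => (c :: w) :: ws

-- B's scan as plain recursion (proof-side)
def pvScan : List Char → Bool → Bool → List Char
  | [], _, _ => []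
  | c :: r, s, d =>
      if c = ' ' then ' ' :: pvScan r true false
      else if d then pvScan r s d
      else if s && c = '[' then pvScan r false d
      else if c = ']' then pvScan r false true
      else c :: pvScan r false d

def pvState : List Char → Bool → Bool → Bool × Bool
  | [], s, d => (s, d)
  | c :: r, s, d =>
      if c = ' ' then pvState r true false
      else if d then pvState r s d
      else if s && c = '[' then pvState r false d
      else if c = ']' then pvState r false true
      else pvState r false d

theorem pvFoldB_eq (cs : List Char) : ∀ (out : List Char) (s d : Bool),
    cs.foldl pvStepB (out, s, d) = (out ++ pvScan cs s d, pvState cs s d) := by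
  induction cs with
  | nil => intro out s d; simp [pvScan, pvState]
  | cons c r ih =>
      intro out s d
      simp only [List.foldl_cons, pvStepB]
      by_cases h1 : c = ' '
      · simp only [if_pos h1]; rw [ih]; simp [pvScan, pvState, h1]
      · rw [if_neg h1]
        by_cases h2 : d
        · simp only [h2, if_pos rfl]; rw [ih]; simp [pvScan, pvState, h1, h2]
        · simp only [h2]
          by_cases h3 : (s && decide (c = '[')) = true
          · simp only [h3, if_pos rfl, Bool.false_eq_true, if_false]
            rw [ih]; simp [pvScan, pvState, h1, h2, h3]
          · simp only [Bool.not_eq_true] at h3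
            simp only [h3, Bool.false_eq_true, if_false]
            by_cases h4 : c = ']'
            · simp only [if_pos h4]; rw [ih]; simp [pvScan, pvState, h1, h2, h3, h4]
            · simp only [if_neg h4]; rw [ih]; simp [pvScan, pvState, h1, h2, h3, h4]

theorem pvSplit1_ne_nil (sep : Char) (cs : List Char) : pvSplit1 sep cs ≠ [] := by
  cases cs with
  | nil => simp [pvSplit1]
  | cons c r =>
      simp only [pvSplit1]
      by_cases hc : c = sep
      · simp [hc]
      · simp only [if_neg hc]
        cases pvSplit1 sep r <;> simp

theorem pvSplitOn_go_eq (sep : Char) (l : List Char) : ∀ (fuel : Nat) (cur : List Char) (acc : List (List Char)),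
    l.length ≤ fuel →
    PySem.Chars.splitOn.go [sep] fuel l cur acc =
      acc.reverse ++ (match pvSplit1 sep l with
        | [] => []
        | w :: ws => (cur.reverse ++ w) :: ws) := by
  induction l with
  | nil =>
      intro fuel cur acc _
      cases fuel <;> simp [PySem.Chars.splitOn.go, pvSplit1]
  | cons c rest ih =>
      intro fuel cur acc hf
      cases fuel with
      | zero => simp at hf
      | succ f =>
          have hrest : rest.length ≤ f := by simpa using hf
          simp only [PySem.Chars.splitOn.go, List.isPrefixOf, List.isPrefixOf_nil_left,
            Bool.and_true]
          by_cases hc : sep = c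
          · subst hc
            simp only [beq_self_eq_true, if_pos rfl, List.length_cons, List.length_nil,
              Nat.zero_add, List.drop_succ_cons, List.drop_zero]
            rw [ih f [] (cur.reverse :: acc) hrest]
            obtain ⟨w, ws, hw⟩ := List.exists_cons_of_ne_nil (pvSplit1_ne_nil sep rest)
            simp [pvSplit1, hw]
          · have hc' : (sep == c) = false := by simpa using hc
            simp only [hc', Bool.false_eq_true, if_false]
            rw [ih f (c :: cur) acc hrest]
            obtain ⟨w, ws, hw⟩ := List.exists_cons_of_ne_nil (pvSplit1_ne_nil sep rest)
            have hcs : c ≠ sep := fun h => hc h.symm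
            simp [pvSplit1, hw, hcs]

theorem pvSplitOn_eq (sep : Char) (cs : List Char) :
    PySem.Chars.splitOn cs [sep] = pvSplit1 sep cs := by
  rw [PySem.Chars.splitOn, pvSplitOn_go_eq sep cs (cs.length + 1) [] [] (by omega)]
  obtain ⟨w, ws, hw⟩ := List.exists_cons_of_ne_nil (pvSplit1_ne_nil sep cs)
  simp [hw]

theorem pvSplit1_head (sep : Char) (cs : List Char) :
    (pvSplit1 sep cs).head? = some (cs.takeWhile (· ≠ sep)) := by
  induction cs with
  | nil => simp [pvSplit1]
  | cons c r ih =>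
      simp only [pvSplit1]
      by_cases hc : c = sep
      · simp [hc]
      · simp only [if_neg hc]
        obtain ⟨w, ws, hw⟩ := List.exists_cons_of_ne_nil (pvSplit1_ne_nil sep r)
        rw [hw] at ih ⊢
        simp only [List.head?_cons, Option.some.injEq] at ih
        simp [List.takeWhile_cons, hc, ih]

theorem pvSplit1_of_not_mem (sep : Char) (cs : List Char) (h : sep ∉ cs) :
    pvSplit1 sep cs = [cs] := by
  induction cs with
  | nil => rfl
  | cons c r ih =>
      simp only [List.mem_cons, not_or] at h
      have : c ≠ sep := fun hx => h.1 hx.symm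
      simp [pvSplit1, this, ih h.2]

theorem pvSplit1_append (sep : Char) (w r : List Char) (h : sep ∉ w) :
    pvSplit1 sep (w ++ sep :: r) = w :: pvSplit1 sep r := by
  induction w with
  | nil => simp [pvSplit1]
  | cons c t ih =>
      simp only [List.mem_cons, not_or] at h
      have hc : c ≠ sep := fun hx => h.1 hx.symm
      simp [pvSplit1, hc, ih h.2]

theorem pvScan_drop (cs : List Char) (h : ' ' ∉ cs) : ∀ (s : Bool), pvScan cs s true = [] := by
  induction cs with
  | nil => intro s; rfl
  | cons c r ih =>
      intro s
      simp only [List.mem_cons, not_or] at h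
      have hc : c ≠ ' ' := fun hx => h.1 hx.symm
      simp [pvScan, hc, ih h.2]

theorem pvScan_word_nostart (cs : List Char) (h : ' ' ∉ cs) :
    pvScan cs false false = cs.takeWhile (· ≠ ']') := by
  induction cs with
  | nil => rfl
  | cons c r ih =>
      simp only [List.mem_cons, not_or] at h
      have hc : c ≠ ' ' := fun hx => h.1 hx.symm
      by_cases hb : c = ']'
      · simp [pvScan, hc, hb, pvScan_drop r h.2, List.takeWhile_cons]
      · simp [pvScan, hc, hb, ih h.2, List.takeWhile_cons]

theorem pvTakeWhile_of_no_bracket (cs : List Char) (h : ']' ∉ cs) :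
    cs.takeWhile (· ≠ ']') = cs := by
  refine List.takeWhile_eq_self_iff.mpr ?_
  intro x hx
  simp only [decide_eq_true_eq]
  exact fun hxe => h (hxe ▸ hx)

-- A's per-word processing is "strip one leading '[', truncate at the first ']'"
theorem pvProcA_eq_takeWhile (w : List Char) :
    pvProcA w = (if PySem.Chars.startswith w ['['] then w.tail else w).takeWhile (· ≠ ']') := by
  unfold pvProcA
  dsimp only
  by_cases hs : PySem.Chars.startswith w ['['] = true
  · have hslice : PySem.Chars.slice w (some 1) none = w.tail := PySem.List.slice_from_one w
    rw [if_pos hs, hslice]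
    by_cases hf : PySem.Chars.find w.tail [']'] ≠ -1
    · rw [if_pos hf]
      have hd := pvSplit1_head ']' w.tail
      rw [pvSplitOn_eq]
      obtain ⟨v, vs, hv⟩ := List.exists_cons_of_ne_nil (pvSplit1_ne_nil ']' w.tail)
      rw [hv] at hd ⊢
      simp only [List.head?_cons, Option.some.injEq] at hd
      simp [PySem.List.pyGet?, PySem.List.pyIdx?, hd, hs]
    · rw [if_neg hf]
      rw [not_not] at hf
      have : ¬ [']'] <:+: w.tail := (not_iff_not.mpr (PySem.Chars.find_ne_neg_one_iff w.tail [']'])).mp (by simp [hf])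
      rw [List.singleton_infix_iff] at this
      rw [if_pos hs, pvTakeWhile_of_no_bracket _ this]
  · rw [if_neg hs, if_neg hs]
    by_cases hf : PySem.Chars.find w [']'] ≠ -1
    · rw [if_pos hf]
      have hd := pvSplit1_head ']' w
      rw [pvSplitOn_eq]
      obtain ⟨v, vs, hv⟩ := List.exists_cons_of_ne_nil (pvSplit1_ne_nil ']' w)
      rw [hv] at hd ⊢
      simp only [List.head?_cons, Option.some.injEq] at hd
      simp [PySem.List.pyGet?, PySem.List.pyIdx?, hd, hs]
    · rw [if_neg hf]
      rw [not_not] at hf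
      have : ¬ [']'] <:+: w := (not_iff_not.mpr (PySem.Chars.find_ne_neg_one_iff w [']'])).mp (by simp [hf])
      rw [List.singleton_infix_iff] at this
      rw [pvTakeWhile_of_no_bracket _ this]

theorem pvProcA_eq_scan (w : List Char) (h : ' ' ∉ w) :
    pvProcA w = pvScan w true false := by
  rw [pvProcA_eq_takeWhile]
  cases w with
  | nil => rfl
  | cons c r =>
      simp only [List.mem_cons, not_or] at h
      have hc : c ≠ ' ' := fun hx => h.1 hx.symm
      by_cases hl : c = '['
      · have hs : PySem.Chars.startswith (c :: r) ['['] = true := by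
          rw [PySem.Chars.startswith_iff]
          exact ⟨r, by simp [hl]⟩
        rw [if_pos hs]
        simp only [List.tail_cons]
        simp [pvScan, hc, hl, pvScan_word_nostart r h.2]
      · have hs : ¬ PySem.Chars.startswith (c :: r) ['['] = true := by
          rw [PySem.Chars.startswith_iff]
          intro hp
          rcases hp with ⟨t, ht⟩
          simp only [List.singleton_append, List.cons.injEq] at ht
          exact hl ht.1.symm
        rw [if_neg hs]
        by_cases hb : c = ']'
        · simp [pvScan, hc, hl, hb, pvScan_drop r h.2, List.takeWhile_cons]
        · simp [pvScan, hc, hl, hb, pvScan_word_nostart r h.2, List.takeWhile_cons]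

theorem pvScan_append (w rest : List Char) : ∀ (s d : Bool),
    pvScan (w ++ rest) s d = pvScan w s d ++ pvScan rest (pvState w s d).1 (pvState w s d).2 := by
  induction w with
  | nil => intro s d; simp [pvScan, pvState]
  | cons c t ih =>
      intro s d
      by_cases h1 : c = ' '
      · simp [pvScan, pvState, h1, ih]
      · by_cases h2 : d
        · simp [pvScan, pvState, h1, h2, ih]
        · by_cases h3 : (s && decide (c = '[')) = true
          · simp [pvScan, pvState, h1, h2, h3, ih]
          · by_cases h4 : c = ']'
            · simp [pvScan, pvState, h1, h2, h3, h4, ih]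
            · simp [pvScan, pvState, h1, h2, h3, h4, ih]

theorem pvDropWhile_cons_not {p : Char → Bool} {l xs : List Char} {x : Char}
    (hd : l.dropWhile p = x :: xs) : p x = false := by
  induction l with
  | nil => simp at hd
  | cons c t ih =>
      rw [List.dropWhile_cons] at hd
      split at hd
      · exact ih hd
      · cases hd
        rename_i hc
        simpa using hc

theorem pvMain (cs : List Char) :
    PySem.Chars.join [' '] ((pvSplit1 ' ' cs).map pvProcA) = pvScan cs true false := by
  have key : ∀ (n : Nat) (l : List Char), l.length ≤ n →
      PySem.Chars.join [' '] ((pvSplit1 ' ' l).map pvProcA) = pvScan l true false := by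
    intro n
    induction n with
    | zero =>
        intro l hl
        have : l = [] := List.length_eq_zero_iff.mp (Nat.le_zero.mp hl)
        subst this
        rfl
    | succ m ih =>
        intro l hl
        by_cases hsp : ' ' ∈ l
        · have hw : ' ' ∉ l.takeWhile (· ≠ ' ') := by
            intro hx
            have := List.mem_takeWhile_imp hx
            simp at this
          have hne : l.dropWhile (· ≠ ' ') ≠ [] := by
            simp only [ne_eq, List.dropWhile_eq_nil_iff, not_forall]
            exact ⟨' ', hsp, by simp⟩
          obtain ⟨r, hr⟩ : ∃ r, l.dropWhile (· ≠ ' ') = ' ' :: r := by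
            cases hd : l.dropWhile (· ≠ ' ') with
            | nil => exact absurd hd hne
            | cons x xs =>
                have hx : x = ' ' := by
                  have := pvDropWhile_cons_not hd
                  simpa using this
                exact ⟨xs, by rw [hx]⟩
          have hdec : l = l.takeWhile (· ≠ ' ') ++ ' ' :: r := by
            conv_lhs => rw [← List.takeWhile_append_dropWhile (p := fun c => decide (c ≠ ' ')) (l := l)]
            rw [hr]
          have hlen : r.length ≤ m := by
            have := congrArg List.length hdec
            simp only [List.length_append, List.length_cons] at this
            omega
          rw [hdec, pvSplit1_append ' ' _ r hw, List.map_cons]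
          obtain ⟨v, vs, hv⟩ := List.exists_cons_of_ne_nil (pvSplit1_ne_nil ' ' r)
          rw [hv, List.map_cons, PySem.Chars.join_cons_cons, ← List.map_cons, ← hv]
          rw [ih r hlen, pvScan_append]
          have hsp2 : pvScan (' ' :: r) (pvState (l.takeWhile (· ≠ ' ')) true false).1
              (pvState (l.takeWhile (· ≠ ' ')) true false).2 = ' ' :: pvScan r true false := by
            simp [pvScan]
          rw [hsp2, pvProcA_eq_scan _ hw]
          simp
        · rw [pvSplit1_of_not_mem ' ' l hsp, List.map_singleton, PySem.Chars.join_singleton,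
            pvProcA_eq_scan l hsp]
  exact key cs.length cs le_rfl

-- ===== VERDICT (by name: the statement is the Claim_ definition above) =====
theorem handle_content_spec : Claim_equal_handle_content := by
  intro line _
  unfold Spec_handle_content handle_content handle_content_alt
  by_cases h : line = "\n"
  · rw [if_pos h, if_pos h]
  · rw [if_neg h, if_neg h, pvFoldB_eq]
    dsimp only
    rw [PySem.List.foldl_append_singleton_eq_map, pvSplitOn_eq]
    simp only [List.nil_append]
    rw [pvMain]
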